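-- pv_equiv track=rewrite | github.com/lsh9672/algorithm_study | 2022_03_07/샘터.py | bfs
-- ===== SOURCE A (Python) =====
-- from collections import deque
--
-- def bfs(start_node,k)-> int:
--
--     next_node_cal = [-1,1]
--
--     visited = dict()
--
--     need_visited = deque(list())
--
--
--     for i in start_node:
--         visited[i] = 1
--         need_visited.append([i,0])
--
--     total_count = 0
--
--
--     while need_visited:
--
--         current_node, current_count = need_visited.popleft()
--
--         if k==0:
--             break
--
--         for i in next_node_cal:
--             next_node = current_node + i
--
--             if next_node not in visited and k > 0:
--                 visited[next_node] = 1
--                 need_visited.append([next_node,current_count+1])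
--                 total_count += current_count+1
--                 k -= 1
--
--     return total_count
-- ===== SOURCE B (Python) =====
-- def bfs(start_node, k) -> int:
--     # Level-synchronous two-frontier BFS: expands a whole distance level at a
--     # time; a candidate can only collide with the previous level, the current
--     # level or this level's new nodes, so no global visited set is kept, and
--     # the k-cutoff is handled arithmetically (take = min(k, #new)).
--     prev = set()
--     curset = set(start_node)
--     cur = list(start_node)
--     total = 0
--     d = 0
--     while cur and k > 0:
--         d += 1
--         new = []
--         newset = set()
--         for x in cur:
--             for y in (x - 1, x + 1):
--                 if y not in prev and y not in curset and y not in newset: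
--                     newset.add(y)
--                     new.append(y)
--         take = min(k, len(new))
--         total += d * take
--         k -= take
--         prev = curset
--         curset = newset
--         cur = new
--     return total
-- ===== Notes on version B (the rewrite author's own statement) =====
-- stated objective: alternative
-- what changed: Replaces A's per-node deque BFS (queue of [node,count] pairs plus an ever-growing visited dict) by a two-frontier level-synchronous expansion: one whole distance level is produced at a time, a candidate is checked only against the previous, current and new level (sufficient on the integer line) so no global visited structure is kept, and the k-cutoff is handled arithmetically per level (take = min(k, #new); total += d*take) instead of per-node counters and decrements.
import Mathlib
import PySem

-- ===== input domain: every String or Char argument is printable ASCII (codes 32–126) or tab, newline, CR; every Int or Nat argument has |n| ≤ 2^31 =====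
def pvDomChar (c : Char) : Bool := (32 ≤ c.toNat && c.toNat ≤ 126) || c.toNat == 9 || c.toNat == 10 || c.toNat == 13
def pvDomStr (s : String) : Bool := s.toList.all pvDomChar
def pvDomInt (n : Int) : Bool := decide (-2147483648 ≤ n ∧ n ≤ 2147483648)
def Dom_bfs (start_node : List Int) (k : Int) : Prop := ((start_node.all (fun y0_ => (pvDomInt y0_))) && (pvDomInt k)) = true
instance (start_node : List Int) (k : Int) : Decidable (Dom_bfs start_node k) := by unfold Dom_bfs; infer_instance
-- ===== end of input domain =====

-- B replaces A's per-node deque BFS (queue of [node, count] pairs plus a global visited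
-- dict) by a two-frontier level-synchronous expansion: one whole distance level at a time,
-- collisions checked only against the previous/current/new level (valid on the integer
-- line), the k-cutoff handled arithmetically (take = min(k, #new)). Same return value.

-- ===== PORT A =====
-- the body of "if next_node not in visited and k > 0: …" for one candidate next_node
def tryAdd (v : PySem.Dict Int Int) (q : List (Int × Int)) (k t y c : Int) :
    PySem.Dict Int Int × List (Int × Int) × Int × Int :=
  if v.contains y = false ∧ 0 < k then
    (v.insert y 1, q ++ [(y, c + 1)], k - 1, t + (c + 1))
  else (v, q, k, t)

theorem tryAdd_measure (v : PySem.Dict Int Int) (q : List (Int × Int)) (k t y c : Int) :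
    (tryAdd v q k t y c).2.1.length + 2 * (tryAdd v q k t y c).2.2.1.toNat ≤
      q.length + 2 * k.toNat := by
  unfold tryAdd; split
  · rename_i h; simp; omega
  · simp

def bfsLoop (v : PySem.Dict Int Int) (queue : List (Int × Int)) (k total : Int) : Int :=
  match queue with
  | [] => total
  | (x, c) :: rest =>
    if k = 0 then total
    else
      match _h1 : tryAdd v rest k total (x - 1) c with
      | (v1, q1, k1, t1) =>
        match _h2 : tryAdd v1 q1 k1 t1 (x + 1) c with
        | (v2, q2, k2, t2) => bfsLoop v2 q2 k2 t2
termination_by queue.length + 2 * k.toNat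
decreasing_by
  have m1 := tryAdd_measure v rest k total (x - 1) c
  have m2 := tryAdd_measure v1 q1 k1 t1 (x + 1) c
  rw [_h1] at m1
  rw [_h2] at m2
  simp only [List.length_cons] at *
  omega

def bfs (start_node : List Int) (k : Int) : Int :=
  let init := start_node.foldl
    (fun (acc : PySem.Dict Int Int × List (Int × Int)) i =>
      (acc.1.insert i 1, acc.2 ++ [(i, 0)]))
    (PySem.Dict.empty, [])
  bfsLoop init.1 init.2 k 0

-- ===== PORT B =====
-- "if y not in prev and y not in curset and y not in newset: …" for one candidate y
def addCand (prev curset : PySem.Set Int) (st : PySem.Set Int × List Int) (y : Int) :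
    PySem.Set Int × List Int :=
  if PySem.Set.contains prev y || PySem.Set.contains curset y || PySem.Set.contains st.1 y then st
  else (PySem.Set.add st.1 y, st.2 ++ [y])

def levelNew (prev curset : PySem.Set Int) (cur : List Int) : PySem.Set Int × List Int :=
  cur.foldl (fun st x => addCand prev curset (addCand prev curset st (x - 1)) (x + 1))
    (PySem.Set.empty, [])

def bfsAltLoop (prev curset : PySem.Set Int) (cur : List Int) (k d total : Int) : Int :=
  if cur ≠ [] ∧ 0 < k then
    let r := levelNew prev curset cur
    let take := min k (r.2.length : Int)
    bfsAltLoop curset r.1 r.2 (k - take) (d + 1) (total + (d + 1) * take)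
  else total
termination_by 2 * k.toNat + (if cur = [] then 0 else 1)
decreasing_by
  rename_i hcond
  obtain ⟨hf, hk⟩ := hcond
  simp only [if_neg hf]
  by_cases hr : (levelNew prev curset cur).2 = []
  · rw [if_pos hr]
    simp only [hr, List.length_nil]
    simp only [Nat.cast_zero]
    omega
  · rw [if_neg hr]
    have h1 : 1 ≤ (levelNew prev curset cur).2.length := List.length_pos_iff.mpr hr
    omega

def bfs_alt (start_node : List Int) (k : Int) : Int :=
  bfsAltLoop PySem.Set.empty (PySem.Set.ofList start_node) start_node k 0 0


-- ===== PRECONDITION & SPEC =====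
def Spec_bfs (start_node : List Int) (k : Int) (out : Int) : Prop := out = bfs_alt start_node k
instance (start_node : List Int) (k : Int) (out : Int) : Decidable (Spec_bfs start_node k out) := by unfold Spec_bfs; infer_instance

-- ===== CLAIM (what is proved, stated in full; the proofs are below) =====
def Claim_equal_bfs : Prop := ∀ (start_node : List Int) (k : Int), Dom_bfs start_node k → Spec_bfs start_node k (bfs start_node k)

-- ===== LEMMAS AND PROOFS =====

-- minimum distance from y to the nonempty start list x0 :: xs
def distTo (x0 : Int) (xs : List Int) (y : Int) : Nat :=
  (xs.map (fun s => (y - s).natAbs)).foldl min (y - x0).natAbs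

theorem distTo_le (x0 : Int) (xs : List Int) (y s : Int) (hs : s = x0 ∨ s ∈ xs) :
    distTo x0 xs y ≤ (y - s).natAbs := by
  unfold distTo
  rcases hs with rfl | hs
  · exact (PySem.List.foldl_min_le _ _).1
  · exact (PySem.List.foldl_min_le _ _).2 _ (List.mem_map_of_mem hs)

theorem distTo_exists (x0 : Int) (xs : List Int) (y : Int) :
    ∃ s, (s = x0 ∨ s ∈ xs) ∧ distTo x0 xs y = (y - s).natAbs := by
  unfold distTo
  rcases PySem.List.foldl_min_mem (xs.map (fun s => (y - s).natAbs)) (y - x0).natAbs with h | h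
  · exact ⟨x0, Or.inl rfl, h⟩
  · rcases List.mem_map.mp h with ⟨s, hs, he⟩
    exact ⟨s, Or.inr hs, he.symm⟩

theorem distTo_adj (x0 : Int) (xs : List Int) (y : Int) :
    distTo x0 xs (y + 1) ≤ distTo x0 xs y + 1 ∧ distTo x0 xs y ≤ distTo x0 xs (y + 1) + 1 := by
  obtain ⟨s, hs, he⟩ := distTo_exists x0 xs y
  obtain ⟨s', hs', he'⟩ := distTo_exists x0 xs (y + 1)
  have h1 := distTo_le x0 xs (y + 1) s hs
  have h2 := distTo_le x0 xs y s' hs'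
  omega

theorem distTo_step_down (x0 : Int) (xs : List Int) (y : Int) (h : 1 ≤ distTo x0 xs y) :
    distTo x0 xs (y - 1) = distTo x0 xs y - 1 ∨ distTo x0 xs (y + 1) = distTo x0 xs y - 1 := by
  obtain ⟨s, hs, he⟩ := distTo_exists x0 xs y
  have hadj1 := distTo_adj x0 xs (y - 1)
  have hadj2 := distTo_adj x0 xs y
  simp only [sub_add_cancel] at hadj1
  by_cases hc : s < y
  · left
    have h1 := distTo_le x0 xs (y - 1) s hs
    omega
  · right
    have h1 := distTo_le x0 xs (y + 1) s hs
    omega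

theorem distTo_zero_iff (x0 : Int) (xs : List Int) (y : Int) :
    distTo x0 xs y = 0 ↔ (y = x0 ∨ y ∈ xs) := by
  constructor
  · intro h
    obtain ⟨s, hs, he⟩ := distTo_exists x0 xs y
    have : y = s := by omega
    subst this; exact hs
  · intro h
    have := distTo_le x0 xs y y h
    omega

def tryAddN (c : Int) (st : PySem.Dict Int Int × List Int × Int × Int) (y : Int) :
    PySem.Dict Int Int × List Int × Int × Int :=
  if st.1.contains y = false ∧ 0 < st.2.2.1 then
    (st.1.insert y 1, st.2.1 ++ [y], st.2.2.1 - 1, st.2.2.2 + (c + 1))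
  else st

def levelA (c : Int) (xs : List Int) (st : PySem.Dict Int Int × List Int × Int × Int) :
    PySem.Dict Int Int × List Int × Int × Int :=
  xs.foldl (fun st x => tryAddN c (tryAddN c st (x - 1)) (x + 1)) st

theorem bfsLoop_nonpos (q : List (Int × Int)) : ∀ (v : PySem.Dict Int Int) (k t : Int),
    k ≤ 0 → bfsLoop v q k t = t := by
  induction q with
  | nil => intro v k t hk; rw [bfsLoop]
  | cons p rest ih =>
    intro v k t hk
    obtain ⟨x, c⟩ := p
    rw [bfsLoop]
    by_cases h0 : k = 0
    · simp [h0]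
    · have hlt : ¬ 0 < k := by omega
      simp only [h0, tryAdd, hlt, and_false, if_neg, not_false_eq_true]
      exact ih v k t hk

theorem tryAdd_shape (v : PySem.Dict Int Int) (P : List (Int × Int)) (ys : List Int)
    (k t y c : Int) :
    tryAdd v (P ++ ys.map (fun z => (z, c + 1))) k t y c =
      ((tryAddN c (v, ys, k, t) y).1,
       P ++ (tryAddN c (v, ys, k, t) y).2.1.map (fun z => (z, c + 1)),
       (tryAddN c (v, ys, k, t) y).2.2.1,
       (tryAddN c (v, ys, k, t) y).2.2.2) := by
  unfold tryAdd tryAddN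
  split <;> rename_i h
  · simp at h ⊢
  · simp

theorem levelA_nonpos (c : Int) (xs : List Int) (v : PySem.Dict Int Int) (ys : List Int)
    (k t : Int) (hk : k ≤ 0) : levelA c xs (v, ys, k, t) = (v, ys, k, t) := by
  induction xs with
  | nil => rfl
  | cons x xs ih =>
    have hlt : ¬ 0 < k := by omega
    simp only [levelA, List.foldl_cons] at ih ⊢
    simp only [tryAddN, hlt, and_false, if_neg, not_false_eq_true]
    exact ih

theorem bfsLoop_decomp (c : Int) (xs : List Int) : ∀ (ys : List Int)
    (v : PySem.Dict Int Int) (k t : Int),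
    bfsLoop v (xs.map (fun z => (z, c)) ++ ys.map (fun z => (z, c + 1))) k t =
      bfsLoop (levelA c xs (v, ys, k, t)).1
        ((levelA c xs (v, ys, k, t)).2.1.map (fun z => (z, c + 1)))
        (levelA c xs (v, ys, k, t)).2.2.1 (levelA c xs (v, ys, k, t)).2.2.2 := by
  induction xs with
  | nil => intro ys v k t; simp [levelA]
  | cons x xs ih =>
    intro ys v k t
    by_cases h0 : k = 0
    · subst h0
      rw [List.map_cons, List.cons_append, bfsLoop]
      rw [levelA_nonpos c (x :: xs) v ys 0 t le_rfl]
      rw [bfsLoop_nonpos _ _ _ _ le_rfl]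
      simp
    · rw [List.map_cons, List.cons_append, bfsLoop]
      simp only [h0, if_false]
      rw [tryAdd_shape v (xs.map (fun z => (z, c))) ys k t (x - 1) c]
      rcases he1 : tryAddN c (v, ys, k, t) (x - 1) with ⟨v1, ys1, k1, t1⟩
      rw [tryAdd_shape v1 (xs.map (fun z => (z, c))) ys1 k1 t1 (x + 1) c]
      rcases he2 : tryAddN c (v1, ys1, k1, t1) (x + 1) with ⟨v2, ys2, k2, t2⟩
      have hL : levelA c (x :: xs) (v, ys, k, t) = levelA c xs (v2, ys2, k2, t2) := by
        simp [levelA, he1, he2]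
      rw [hL, ← ih ys2 v2 k2 t2]


theorem mem_set_add (s : PySem.Set Int) (x y : Int) :
    y ∈ PySem.Set.add s x ↔ y ∈ s ∨ y = x := by
  simp [PySem.Set.add_eq_ite]; by_cases h : x ∈ s <;> simp [h]
  intro he; subst he; exact h


theorem foldl_pair_flatMap {σ : Type} (g : σ → Int → σ) (xs : List Int) : ∀ (st : σ),
    xs.foldl (fun st x => g (g st (x - 1)) (x + 1)) st =
      (xs.flatMap (fun x => [x - 1, x + 1])).foldl g st := by
  induction xs with
  | nil => intro st; rfl
  | cons x xs ih => intro st; simp only [List.flatMap_cons, List.foldl_append, List.foldl_cons,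
      List.foldl_nil]; exact ih _


-- coupling relation between A's state and B's state during one level;
-- VIS abstracts "visited before this level", prev/curset are B's two frontiers
def CRel (k0 t0 c : Int) (VIS : Int → Prop) (stA : PySem.Dict Int Int × List Int × Int × Int)
    (stB : PySem.Set Int × List Int) : Prop :=
  stA.2.1 = stB.2.take k0.toNat ∧
  stA.2.2.1 = k0 - min k0 (stB.2.length : Int) ∧
  stA.2.2.2 = t0 + (c + 1) * min k0 (stB.2.length : Int) ∧
  (∀ y : Int, y ∈ stB.1 ↔ y ∈ stB.2) ∧
  (∀ y : Int, stA.1.contains y = true ↔ (VIS y ∨ y ∈ stB.2.take k0.toNat))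

theorem rel_step (k0 t0 c : Int) (hk0 : 0 ≤ k0) (VIS : Int → Prop)
    (prev curset : PySem.Set Int)
    (stA : PySem.Dict Int Int × List Int × Int × Int) (stB : PySem.Set Int × List Int)
    (h : CRel k0 t0 c VIS stA stB) (y : Int)
    (hy : VIS y ↔ (y ∈ prev ∨ y ∈ curset)) :
    CRel k0 t0 c VIS (tryAddN c stA y) (addCand prev curset stB y) := by
  obtain ⟨v, nA, kA, tA⟩ := stA
  obtain ⟨ns, nB⟩ := stB
  obtain ⟨h1, h2, h3, h4, h5⟩ := h
  simp only at h1 h2 h3 h4 h5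
  by_cases hv : VIS y
  · -- B skips (y in prev or curset); A's dict contains y
    have hBid : addCand prev curset (ns, nB) y = (ns, nB) := by
      have hg : (PySem.Set.contains prev y || PySem.Set.contains curset y ||
          PySem.Set.contains ns y) = true := by
        simp only [Bool.or_eq_true, PySem.Set.contains_iff]
        rcases hy.mp hv with hc | hc
        · exact Or.inl (Or.inl hc)
        · exact Or.inl (Or.inr hc)
      simp only [addCand, hg, if_true]
    have hvy : v.contains y = true := (h5 y).mpr (Or.inl hv)
    have hAid : tryAddN c (v, nA, kA, tA) y = (v, nA, kA, tA) := by
      simp [tryAddN, hvy]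
    rw [hBid, hAid]; exact ⟨h1, h2, h3, h4, h5⟩
  · by_cases hnB : y ∈ nB
    · -- B skips (y already among this level's new nodes)
      have hBid : addCand prev curset (ns, nB) y = (ns, nB) := by
        have hg : (PySem.Set.contains prev y || PySem.Set.contains curset y ||
            PySem.Set.contains ns y) = true := by
          simp only [Bool.or_eq_true, PySem.Set.contains_iff]
          exact Or.inr ((h4 y).mpr hnB)
        simp only [addCand, hg, if_true]
      rw [hBid]
      by_cases htk : y ∈ nB.take k0.toNat
      · -- A's dict contains y (it was taken)
        have hvy : v.contains y = true := (h5 y).mpr (Or.inr htk)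
        have hAid : tryAddN c (v, nA, kA, tA) y = (v, nA, kA, tA) := by
          simp [tryAddN, hvy]
        rw [hAid]; exact ⟨h1, h2, h3, h4, h5⟩
      · -- y was dropped: k must be exhausted, A skips via k = 0
        have hlen : k0.toNat < nB.length := by
          by_contra hc
          rw [List.take_of_length_le (by omega)] at htk
          exact htk hnB
        have hkA : kA = 0 := by omega
        have hAid : tryAddN c (v, nA, kA, tA) y = (v, nA, kA, tA) := by
          simp [tryAddN, hkA]
        rw [hAid]; exact ⟨h1, h2, h3, h4, h5⟩
    · -- y is genuinely new: B adds it
      have hns : y ∉ ns := fun hc => hnB ((h4 y).mp hc)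
      have hprev : y ∉ prev := fun hc => hv (hy.mpr (Or.inl hc))
      have hcur : y ∉ curset := fun hc => hv (hy.mpr (Or.inr hc))
      have hBadd : addCand prev curset (ns, nB) y = (PySem.Set.add ns y, nB ++ [y]) := by
        simp only [addCand]
        rw [if_neg]
        simp only [Bool.or_eq_true, PySem.Set.contains_iff, not_or]
        exact ⟨⟨hprev, hcur⟩, hns⟩
      rw [hBadd]
      have hvy : v.contains y = false := by
        rcases hc : v.contains y with _ | _
        · rfl
        · rcases (h5 y).mp hc with hc' | hc'
          · exact absurd hc' hv
          · exact absurd (List.mem_of_mem_take hc') hnB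
      by_cases hkA : 0 < kA
      · -- A adds too; here |nB| < k0
        have hlt : (nB.length : Int) < k0 := by omega
        have hltN : nB.length < k0.toNat := by omega
        have hAadd : tryAddN c (v, nA, kA, tA) y =
            (v.insert y 1, nA ++ [y], kA - 1, tA + (c + 1)) := by
          simp [tryAddN, hvy, hkA]
        rw [hAadd]
        have htk0 : nB.take k0.toNat = nB := List.take_of_length_le (by omega)
        have htk1 : (nB ++ [y]).take k0.toNat = nB ++ [y] :=
          List.take_of_length_le (by simp; omega)
        refine ⟨?_, ?_, ?_, ?_, ?_⟩
        · simp only []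
          rw [h1, htk0, htk1]
        · simp only [List.length_append, List.length_cons, List.length_nil]
          push_cast; omega
        · simp only [List.length_append, List.length_cons, List.length_nil]
          push_cast
          have hm1 : min k0 (nB.length : Int) = (nB.length : Int) := by omega
          have hm2 : min k0 ((nB.length : Int) + 1) = (nB.length : Int) + 1 := by omega
          rw [h3, hm1, hm2]; ring
        · intro z
          simp only [mem_set_add, List.mem_append, List.mem_singleton]
          rw [h4 z]
        · intro z
          simp only [htk1]
          rw [show ((v.insert y 1).contains z = true) ↔ (z = y ∨ v.contains z = true) by
            simp [PySem.Dict.contains_insert]]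
          rw [h5 z, htk0]
          simp only [List.mem_append, List.mem_singleton]
          tauto
      · -- k exhausted: A skips, B's new element lands in the dropped part
        have hkA0 : kA = 0 := by omega
        have hlen : k0 ≤ (nB.length : Int) := by omega
        have hAid : tryAddN c (v, nA, kA, tA) y = (v, nA, kA, tA) := by
          simp [tryAddN, hkA0]
        rw [hAid]
        have htk : (nB ++ [y]).take k0.toNat = nB.take k0.toNat :=
          List.take_append_of_le_length (by omega)
        refine ⟨?_, ?_, ?_, ?_, ?_⟩
        · simp only []
          rw [h1, htk]
        · simp only [List.length_append, List.length_cons, List.length_nil]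
          push_cast; omega
        · simp only [List.length_append, List.length_cons, List.length_nil]
          push_cast
          have hm1 : min k0 (nB.length : Int) = k0 := by omega
          have hm2 : min k0 ((nB.length : Int) + 1) = k0 := by omega
          rw [h3, hm1, hm2]
        · intro z
          simp only [mem_set_add, List.mem_append, List.mem_singleton]
          rw [h4 z]
        · intro z
          rw [htk, h5 z]

theorem rel_fold (k0 t0 c : Int) (hk0 : 0 ≤ k0) (VIS : Int → Prop)
    (prev curset : PySem.Set Int) (cs : List Int) :
    ∀ (stA : PySem.Dict Int Int × List Int × Int × Int) (stB : PySem.Set Int × List Int),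
    (∀ y ∈ cs, (VIS y ↔ (y ∈ prev ∨ y ∈ curset))) →
    CRel k0 t0 c VIS stA stB →
    CRel k0 t0 c VIS (cs.foldl (tryAddN c) stA) (cs.foldl (addCand prev curset) stB) := by
  induction cs with
  | nil => intro stA stB _ h; exact h
  | cons y cs ih =>
    intro stA stB hcand h
    exact ih _ _ (fun z hz => hcand z (List.mem_cons_of_mem _ hz))
      (rel_step k0 t0 c hk0 VIS prev curset stA stB h y (hcand y (List.mem_cons_self)))

theorem fold_mono (prev curset : PySem.Set Int) (cs : List Int) :
    ∀ (st : PySem.Set Int × List Int) (z : Int), z ∈ st.1 →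
      z ∈ (cs.foldl (addCand prev curset) st).1 := by
  induction cs with
  | nil => intro st z h; exact h
  | cons y cs ih =>
    intro st z h
    refine ih _ z ?_
    unfold addCand
    split
    · exact h
    · simp only [mem_set_add]; exact Or.inl h

theorem fold_complete (prev curset : PySem.Set Int) (cs : List Int) :
    ∀ (st : PySem.Set Int × List Int) (y : Int), y ∈ cs → y ∉ prev → y ∉ curset →
      y ∈ (cs.foldl (addCand prev curset) st).1 := by
  induction cs with
  | nil => intro st y h; exact absurd h (List.not_mem_nil)
  | cons z cs ih =>
    intro st y hmem hp hc
    rcases List.mem_cons.mp hmem with rfl | hmem'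
    · refine fold_mono prev curset cs _ y ?_
      unfold addCand
      split
      · rename_i hg
        simp only [Bool.or_eq_true, PySem.Set.contains_iff] at hg
        rcases hg with (hg | hg) | hg
        · exact absurd hg hp
        · exact absurd hg hc
        · exact hg
      · simp
    · exact ih _ y hmem' hp hc

theorem fold_sound (prev curset : PySem.Set Int) (cs : List Int) :
    ∀ (st : PySem.Set Int × List Int) (y : Int), y ∈ (cs.foldl (addCand prev curset) st).2 →
      y ∈ st.2 ∨ (y ∈ cs ∧ y ∉ prev ∧ y ∉ curset) := by
  induction cs with
  | nil => intro st y h; exact Or.inl h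
  | cons z cs ih =>
    intro st y h
    rcases ih _ y h with h' | ⟨h1, h2, h3⟩
    · unfold addCand at h'
      split at h'
      · exact Or.inl h'
      · rename_i hg
        simp only [Bool.or_eq_true, PySem.Set.contains_iff, not_or] at hg
        rcases List.mem_append.mp h' with h'' | h''
        · exact Or.inl h''
        · rcases List.mem_singleton.mp h'' with rfl
          exact Or.inr ⟨List.mem_cons_self, hg.1.1, hg.1.2⟩
    · exact Or.inr ⟨List.mem_cons_of_mem _ h1, h2, h3⟩

theorem level_summary (c k t : Int) (hk : 0 ≤ k) (VIS : Int → Prop)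
    (prev curset : PySem.Set Int) (v : PySem.Dict Int Int)
    (hm : ∀ y : Int, v.contains y = true ↔ VIS y) (cur : List Int)
    (hcand : ∀ y ∈ cur.flatMap (fun x => [x - 1, x + 1]), (VIS y ↔ (y ∈ prev ∨ y ∈ curset))) :
    CRel k t c VIS (levelA c cur (v, [], k, t)) (levelNew prev curset cur) := by
  have h0 : CRel k t c VIS (v, [], k, t) (PySem.Set.empty, []) := by
    refine ⟨by simp, by simp; omega, by simp [show min k 0 = 0 by omega], ?_, ?_⟩
    · intro y; simp [PySem.Set.empty]
    · intro y; simpa using hm y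
  have hA : levelA c cur (v, [], k, t) =
      (cur.flatMap (fun x => [x - 1, x + 1])).foldl (tryAddN c) (v, [], k, t) := by
    unfold levelA; rw [foldl_pair_flatMap]
  have hB : levelNew prev curset cur =
      (cur.flatMap (fun x => [x - 1, x + 1])).foldl (addCand prev curset) (PySem.Set.empty, []) := by
    unfold levelNew; rw [foldl_pair_flatMap]
  rw [hA, hB]
  exact rel_fold k t c hk VIS prev curset _ _ _ hcand h0

theorem main_couple (x0 : Int) (rest : List Int) (n : Nat) : ∀ (k : Int), k.toNat ≤ n →
    ∀ (d : Int) (cur : List Int) (prev curset : PySem.Set Int) (v : PySem.Dict Int Int)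
      (t : Int),
    0 < k → 0 ≤ d →
    (∀ y : Int, v.contains y = true ↔ (distTo x0 rest y : Int) ≤ d) →
    (∀ y : Int, y ∈ curset ↔ (distTo x0 rest y : Int) = d) →
    (∀ y : Int, y ∈ cur ↔ (distTo x0 rest y : Int) = d) →
    (∀ y : Int, y ∈ prev ↔ (distTo x0 rest y : Int) = d - 1) →
    bfsLoop v (cur.map (fun z => (z, d))) k t = bfsAltLoop prev curset cur k d t := by
  induction n with
  | zero => intro k hk; omega
  | succ n ih =>
    intro k hkn d cur prev curset v t hk hd hv hcs hcur hprev
    by_cases hf : cur = []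
    · subst hf
      simp only [List.map_nil]
      rw [bfsLoop, bfsAltLoop]
      simp
    · rw [bfsAltLoop, if_pos ⟨hf, hk⟩]
      have hcand : ∀ y ∈ cur.flatMap (fun x => [x - 1, x + 1]),
          (((distTo x0 rest y : Int) ≤ d) ↔ (y ∈ prev ∨ y ∈ curset)) := by
        intro y hy
        rcases List.mem_flatMap.mp hy with ⟨x, hx, hyx⟩
        have hdx : (distTo x0 rest x : Int) = d := (hcur x).mp hx
        have hadj1 := distTo_adj x0 rest (x - 1)
        have hadj2 := distTo_adj x0 rest x
        simp only [sub_add_cancel] at hadj1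
        have hge : (d : Int) - 1 ≤ (distTo x0 rest y : Int) := by
          rcases List.mem_cons.mp hyx with rfl | hyx'
          · omega
          · rcases List.mem_singleton.mp hyx' with rfl
            omega
        rw [hprev y, hcs y]
        omega
      have hsum := level_summary d k t (le_of_lt hk) (fun y => (distTo x0 rest y : Int) ≤ d)
        prev curset v hv cur hcand
      rcases hE : levelNew prev curset cur with ⟨ns, nB⟩
      rw [hE] at hsum
      obtain ⟨h1, h2, h3, h4, h5⟩ := hsum
      simp only at h1 h2 h3 h4 h5
      have hdec := bfsLoop_decomp d cur [] v k t
      simp only [List.map_nil, List.append_nil] at hdec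
      rw [hdec, h1, h2, h3]
      show _ = bfsAltLoop curset ns nB (k - min k (nB.length : Int)) (d + 1)
        (t + (d + 1) * min k (nB.length : Int))
      -- membership of the new level: exactly the nodes at distance d + 1
      have hnB_iff : ∀ y : Int, y ∈ nB ↔ (distTo x0 rest y : Int) = d + 1 := by
        intro y
        constructor
        · intro hy
          have hs := fold_sound prev curset (cur.flatMap (fun x => [x - 1, x + 1]))
            (PySem.Set.empty, []) y
          rw [← foldl_pair_flatMap (addCand prev curset) cur (PySem.Set.empty, [])] at hs
          have hs' := hs (by rw [show (cur.foldl (fun st x =>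
              addCand prev curset (addCand prev curset st (x - 1)) (x + 1))
              (PySem.Set.empty, [])) = levelNew prev curset cur from rfl, hE]; exact hy)
          rcases hs' with h' | ⟨hcs', hp', hc'⟩
          · exact absurd h' (List.not_mem_nil)
          · rcases List.mem_flatMap.mp hcs' with ⟨x, hx, hyx⟩
            have hdx : (distTo x0 rest x : Int) = d := (hcur x).mp hx
            have hadj1 := distTo_adj x0 rest (x - 1)
            have hadj2 := distTo_adj x0 rest x
            simp only [sub_add_cancel] at hadj1
            have hnp : (distTo x0 rest y : Int) ≠ d - 1 := fun hc => hp' ((hprev y).mpr hc)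
            have hnc : (distTo x0 rest y : Int) ≠ d := fun hc => hc' ((hcs y).mpr hc)
            rcases List.mem_cons.mp hyx with rfl | hyx'
            · omega
            · rcases List.mem_singleton.mp hyx' with rfl
              omega
        · intro hy
          have h1d : 1 ≤ distTo x0 rest y := by omega
          have hstep := distTo_step_down x0 rest y h1d
          have hnp : y ∉ prev := fun hc => by
            have := (hprev y).mp hc; omega
          have hnc : y ∉ curset := fun hc => by
            have := (hcs y).mp hc; omega
          have hmemcs : y ∈ cur.flatMap (fun x => [x - 1, x + 1]) := by
            rcases hstep with hw | hw
            · refine List.mem_flatMap.mpr ⟨y - 1, (hcur (y - 1)).mpr (by omega), ?_⟩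
              simp [sub_add_cancel]
            · refine List.mem_flatMap.mpr ⟨y + 1, (hcur (y + 1)).mpr (by omega), ?_⟩
              simp [add_sub_cancel_right]
          have hcomp := fold_complete prev curset (cur.flatMap (fun x => [x - 1, x + 1]))
            (PySem.Set.empty, []) y hmemcs hnp hnc
          rw [← foldl_pair_flatMap (addCand prev curset) cur (PySem.Set.empty, [])] at hcomp
          rw [show (cur.foldl (fun st x =>
              addCand prev curset (addCand prev curset st (x - 1)) (x + 1))
              (PySem.Set.empty, [])) = levelNew prev curset cur from rfl, hE] at hcomp
          exact (h4 y).mp hcomp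
      by_cases hnil : nB = []
      · subst hnil
        simp only [List.length_nil, List.take_nil, List.map_nil, Nat.cast_zero]
        rw [show min k (0 : Int) = 0 by omega]
        rw [bfsLoop, bfsAltLoop]
        simp
      · by_cases hkk : k ≤ (nB.length : Int)
        · have hmin : min k (nB.length : Int) = k := by omega
          rw [hmin, bfsLoop_nonpos _ _ _ _ (by omega), sub_self, bfsAltLoop]
          rw [if_neg (by simp)]
        · have hlen1 : 1 ≤ nB.length := List.length_pos_iff.mpr hnil
          have hmin : min k (nB.length : Int) = (nB.length : Int) := by omega
          rw [hmin]
          have htake : nB.take k.toNat = nB := List.take_of_length_le (by omega)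
          rw [htake]
          refine ih (k - (nB.length : Int)) (by omega) (d + 1) nB curset ns _ _
            (by omega) (by omega) ?_ ?_ ?_ ?_
          · intro y
            rw [h5 y, htake, hnB_iff y]
            omega
          · intro y
            rw [h4 y, hnB_iff y]
          · exact hnB_iff
          · intro y
            rw [hcs y]
            omega

theorem dict_fold_contains (xs : List Int) : ∀ (d : PySem.Dict Int Int) (y : Int),
    ((xs.foldl (fun (d : PySem.Dict Int Int) i => d.insert i 1) d).contains y = true) ↔
      (d.contains y = true ∨ y ∈ xs) := by
  induction xs with
  | nil => intro d y; simp
  | cons x xs ih =>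
    intro d y
    simp only [List.foldl_cons, ih, PySem.Dict.contains_insert, List.mem_cons]
    constructor
    · rintro (h | h)
      · simp at h
        rcases h with h | h
        · exact Or.inr (Or.inl h)
        · exact Or.inl h
      · exact Or.inr (Or.inr h)
    · rintro (h | h | h)
      · exact Or.inl (by simp [h])
      · exact Or.inl (by simp [h])
      · exact Or.inr h


theorem bfs_top (start_node : List Int) (k : Int) :
    bfs start_node k = bfs_alt start_node k := by
  have hsplit : start_node.foldl
      (fun (acc : PySem.Dict Int Int × List (Int × Int)) i =>
        (acc.1.insert i 1, acc.2 ++ [(i, 0)]))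
      (PySem.Dict.empty, []) =
      (start_node.foldl (fun (d : PySem.Dict Int Int) i => d.insert i 1) PySem.Dict.empty,
       start_node.foldl (fun (q : List (Int × Int)) i => q ++ [(i, 0)]) []) := by
    rw [PySem.List.foldl_prod_mk (f := fun (d : PySem.Dict Int Int) i => d.insert i 1)
      (g := fun (q : List (Int × Int)) i => q ++ [(i, 0)])]
  have hq : start_node.foldl (fun (q : List (Int × Int)) i => q ++ [(i, 0)]) [] =
      start_node.map (fun z => (z, (0 : Int))) := by
    rw [PySem.List.foldl_append_singleton_eq_map]
    simp
  rw [bfs, bfs_alt]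
  simp only [hsplit, hq]
  by_cases hk : 0 < k
  · cases start_node with
    | nil =>
      simp only [List.map_nil]
      rw [bfsLoop, bfsAltLoop]
      simp
    | cons x0 rest =>
      refine main_couple x0 rest k.toNat k le_rfl 0 (x0 :: rest) PySem.Set.empty
        (PySem.Set.ofList (x0 :: rest)) _ 0 hk le_rfl ?_ ?_ ?_ ?_
      · intro y
        rw [dict_fold_contains]
        have hz := distTo_zero_iff x0 rest y
        simp only [PySem.Dict.contains_empty]
        constructor
        · intro h
          rcases h with h | h
          · simp at h
          · have : distTo x0 rest y = 0 := hz.mpr (by simpa using h)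
            omega
        · intro h
          right
          have : distTo x0 rest y = 0 := by omega
          simpa using hz.mp this
      · intro y
        rw [PySem.Set.mem_ofList]
        have hz := distTo_zero_iff x0 rest y
        constructor
        · intro h
          have : distTo x0 rest y = 0 := hz.mpr (by simpa using h)
          omega
        · intro h
          have : distTo x0 rest y = 0 := by omega
          simpa using hz.mp this
      · intro y
        have hz := distTo_zero_iff x0 rest y
        constructor
        · intro h
          have : distTo x0 rest y = 0 := hz.mpr (by simpa using h)
          omega
        · intro h
          have : distTo x0 rest y = 0 := by omega
          simpa using hz.mp this
      · intro y
        constructor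
        · intro h
          exact absurd h (List.not_mem_nil)
        · intro h
          omega
  · rw [bfsLoop_nonpos _ _ _ _ (by omega), bfsAltLoop, if_neg (by simp [hk])]

-- ===== VERDICT (by name: the statement is the Claim_ definition above) =====
theorem bfs_spec : Claim_equal_bfs := by
  intro start_node k _
  unfold Spec_bfs
  exact bfs_top start_node k
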